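-- pv_equiv track=rewrite | github.com/AddienZakia/midterm-ai | src/utils/algorithm.py | _build_neighbors
-- ===== SOURCE A (Python) =====
-- from collections import defaultdict
--
-- def _build_neighbors(region_map: dict) -> dict:
--     by_region: dict[str, list] = defaultdict(list)
--     for c, r in region_map.items():
--         by_region[r].append(c)
--     return {
--         c: [x for x in by_region[r] if x != c]
--         for c, r in region_map.items()
--     }
-- ===== SOURCE B (Python) =====
-- def _build_neighbors(region_map: dict) -> dict:
--     # Single incremental pass: no grouping dict is built and re-scanned.
--     # When a cell arrives, it is cross-linked with the cells of its region
--     # seen so far: appended to each of their neighbor lists, and given a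
--     # copy of that prefix as its own initial list.
--     result = {}
--     seen = {}  # region -> cells of that region processed so far
--     for c, r in region_map.items():
--         prev = seen.setdefault(r, [])
--         for p in prev:
--             result[p].append(c)
--         result[c] = list(prev)
--         prev.append(c)
--     return result
-- ===== Notes on version B (the rewrite author's own statement) =====
-- stated objective: alternative
-- what changed: A makes two passes (group all cells by region, then per cell filter its whole region); B makes one incremental pass that cross-links each arriving cell with the previously seen cells of its region, so no grouping-then-filtering stage exists.
import Mathlib
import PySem

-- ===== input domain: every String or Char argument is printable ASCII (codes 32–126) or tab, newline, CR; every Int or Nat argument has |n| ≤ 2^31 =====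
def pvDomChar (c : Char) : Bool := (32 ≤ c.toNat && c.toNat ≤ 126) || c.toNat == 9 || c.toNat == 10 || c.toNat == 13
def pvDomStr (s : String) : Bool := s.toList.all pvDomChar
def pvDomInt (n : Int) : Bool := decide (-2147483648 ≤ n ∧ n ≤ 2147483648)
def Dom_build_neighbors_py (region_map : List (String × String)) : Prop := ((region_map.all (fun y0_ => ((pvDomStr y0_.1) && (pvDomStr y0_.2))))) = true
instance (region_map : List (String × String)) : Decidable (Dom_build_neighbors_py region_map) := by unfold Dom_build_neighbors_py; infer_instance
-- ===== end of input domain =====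

-- B replaces A's two passes (group by region, then per-cell filter) by ONE incremental pass that
-- cross-links each arriving cell with the previously seen cells of its region (objective: alternative).

-- ===== PORT A =====
def build_neighbors_py (region_map : List (String × String)) : List (String × List String) :=
  let by_region : PySem.Dict String (List String) :=
    region_map.foldl (fun d p => d.modify p.2 [] (fun l => l ++ [p.1])) PySem.Dict.empty
  (region_map.foldl
    (fun d p => d.insert p.1 ((by_region.getD p.2 []).filter (fun x => x != p.1)))
    PySem.Dict.empty).items

-- ===== PORT B =====
-- one pass; state = (result, seen); 'prev = seen.setdefault(r, [])' is getD, with the trailing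
-- 'prev.append(c)' becoming the insert of prev ++ [c] back into seen.
def build_neighbors_py_alt (region_map : List (String × String)) : List (String × List String) :=
  (region_map.foldl
    (fun st p =>
      let prev := st.2.getD p.2 []
      ((prev.foldl (fun res q => res.modify q [] (fun l => l ++ [p.1])) st.1).insert p.1 prev,
       st.2.insert p.2 (prev ++ [p.1])))
    (PySem.Dict.empty, PySem.Dict.empty)).1.items

-- ===== PRECONDITION & SPEC =====
-- Pre_ excludes association lists with duplicate keys: they do not arise from a Python dict
-- (dict construction collapses duplicates), and behaviour there is representation-accidental.
def Pre_build_neighbors_py (region_map : List (String × String)) : Prop :=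
  (region_map.map (fun p => p.1)).Nodup
instance (region_map : List (String × String)) : Decidable (Pre_build_neighbors_py region_map) := by unfold Pre_build_neighbors_py; infer_instance

def pvWitness_build_neighbors_py : (List (String × String)) :=
  [("a", "r"), ("b", "r"), ("c", "s")]

def Spec_build_neighbors_py (region_map : List (String × String)) (out : List (String × List String)) : Prop := out = build_neighbors_py_alt region_map
instance (region_map : List (String × String)) (out : List (String × List String)) : Decidable (Spec_build_neighbors_py region_map out) := by unfold Spec_build_neighbors_py; infer_instance

-- ===== CLAIM (what is proved, stated in full; the proofs are below) =====
def Claim_equal_build_neighbors_py : Prop := ∀ (region_map : List (String × String)), Dom_build_neighbors_py region_map → Pre_build_neighbors_py region_map → Spec_build_neighbors_py region_map (build_neighbors_py region_map)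

-- ===== LEMMAS AND PROOFS =====

-- the members of region r, in region_map order
def pvMembers (rm : List (String × String)) (r : String) : List String :=
  (rm.filter (fun p => p.2 == r)).map (fun p => p.1)

-- the common value of both programs (proved below)
def pvCanon (rm : List (String × String)) : List (String × List String) :=
  rm.map (fun p => (p.1, (pvMembers rm p.2).filter (fun x => x != p.1)))

theorem pvMembers_append (l l' : List (String × String)) (r : String) :
    pvMembers (l ++ l') r = pvMembers l r ++ pvMembers l' r := by
  unfold pvMembers; rw [List.filter_append, List.map_append]

theorem mem_pvMembers (rm : List (String × String)) (c r : String) :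
    c ∈ pvMembers rm r ↔ (c, r) ∈ rm := by
  unfold pvMembers
  constructor
  · intro h
    rcases List.mem_map.1 h with ⟨p, hp, hpc⟩
    rcases List.mem_filter.1 hp with ⟨hmem, hr⟩
    have : p = (c, r) := by
      cases p with
      | mk a b => simp only [beq_iff_eq] at hr; simp_all
    exact this ▸ hmem
  · intro h
    exact List.mem_map.2 ⟨(c, r), List.mem_filter.2 ⟨h, by simp⟩, rfl⟩

theorem pvKey_unique (rm : List (String × String))
    (hk : (rm.map (fun p => p.1)).Nodup) {c r r' : String}
    (h1 : (c, r) ∈ rm) (h2 : (c, r') ∈ rm) : r' = r := by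
  induction rm with
  | nil => cases h1
  | cons p t ih =>
    simp only [List.map_cons, List.nodup_cons] at hk
    cases h1 with
    | head =>
      cases h2 with
      | head => rfl
      | tail _ h2' => exact absurd (List.mem_map.2 ⟨_, h2', rfl⟩) hk.1
    | tail _ h1' =>
      cases h2 with
      | head => exact absurd (List.mem_map.2 ⟨_, h1', rfl⟩) hk.1
      | tail _ h2' => exact ih hk.2 h1' h2'

-- ---------- A side ----------

def pvGrp (rm : List (String × String)) : PySem.Dict String (List String) :=
  rm.foldl (fun d p => d.modify p.2 [] (fun l => l ++ [p.1])) PySem.Dict.empty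

theorem pvGrp_getD_gen (l : List (String × String)) (r : String) :
    ∀ (d : PySem.Dict String (List String)),
      (l.foldl (fun d p => d.modify p.2 [] (fun l => l ++ [p.1])) d).getD r []
      = d.getD r [] ++ (l.filter (fun p => p.2 == r)).map (fun p => p.1) := by
  induction l with
  | nil => intro d; simp
  | cons p t ih =>
    intro d
    simp only [List.foldl_cons, List.filter_cons]
    rw [ih, PySem.Dict.getD_modify]
    by_cases h : r = p.2
    · subst h; simp
    · have h' : ¬ ((p.2 == r) = true) := by simpa using fun e => h e.symm
      simp [h, h']

theorem pvGrp_getD (rm : List (String × String)) (r : String) :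
    (pvGrp rm).getD r [] = pvMembers rm r := by
  unfold pvGrp pvMembers
  rw [pvGrp_getD_gen, PySem.Dict.getD_empty, List.nil_append]

theorem pvA_eq (rm : List (String × String))
    (hk : (rm.map (fun p => p.1)).Nodup) : build_neighbors_py rm = pvCanon rm := by
  show (rm.foldl
      (fun d p => d.insert p.1 (((pvGrp rm).getD p.2 []).filter (fun x => x != p.1)))
      PySem.Dict.empty).items = pvCanon rm
  rw [PySem.Dict.items_foldl_insert_fresh rm (fun p => p.1)
        (fun p => ((pvGrp rm).getD p.2 []).filter (fun x => x != p.1)) PySem.Dict.empty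
        (fun a _ => PySem.Dict.contains_empty _) hk]
  unfold pvCanon
  rw [show (PySem.Dict.empty : PySem.Dict String (List String)).items = [] from rfl,
      List.nil_append]
  exact List.map_congr_left (fun p _ => by rw [pvGrp_getD])

-- ---------- B side ----------

-- the one-pass step of B
def pvStep (st : PySem.Dict String (List String) × PySem.Dict String (List String))
    (p : String × String) :
    PySem.Dict String (List String) × PySem.Dict String (List String) :=
  let prev := st.2.getD p.2 []
  ((prev.foldl (fun res q => res.modify q [] (fun l => l ++ [p.1])) st.1).insert p.1 prev,
   st.2.insert p.2 (prev ++ [p.1]))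

theorem pvAlt_eq_fold (rm : List (String × String)) :
    build_neighbors_py_alt rm
      = (rm.foldl pvStep (PySem.Dict.empty, PySem.Dict.empty)).1.items := rfl

-- the seen-component evolves independently of the result-component
theorem pvSnd_fold (rm : List (String × String)) :
    ∀ (st : PySem.Dict String (List String) × PySem.Dict String (List String)),
      (rm.foldl pvStep st).2
        = rm.foldl (fun s p => s.insert p.2 ((s.getD p.2 []) ++ [p.1])) st.2 := by
  induction rm with
  | nil => intro st; rfl
  | cons p t ih => intro st; simp only [List.foldl_cons]; exact ih _

theorem pvSeen_getD (rm : List (String × String)) (r : String) :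
    ∀ (s : PySem.Dict String (List String)),
      (rm.foldl (fun s p => s.insert p.2 ((s.getD p.2 []) ++ [p.1])) s).getD r []
        = s.getD r [] ++ pvMembers rm r := by
  induction rm with
  | nil => intro s; simp [pvMembers]
  | cons p t ih =>
    intro s
    simp only [List.foldl_cons]
    rw [ih]
    have hm : pvMembers (p :: t) r
        = (if p.2 == r then [p.1] else []) ++ pvMembers t r := by
      unfold pvMembers
      rw [show (p :: t) = [p] ++ t from rfl, List.filter_append, List.map_append]
      by_cases h : (p.2 == r) = true <;> simp [List.filter, h]
    rw [hm, PySem.Dict.getD_insert]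
    by_cases h : r = p.2
    · subst h; simp
    · have h' : ¬ ((p.2 == r) = true) := by simpa using fun e => h e.symm
      simp [h, h']

theorem pvSeen (rm : List (String × String)) (r : String) :
    ((rm.foldl pvStep (PySem.Dict.empty, PySem.Dict.empty)).2).getD r [] = pvMembers rm r := by
  rw [pvSnd_fold, pvSeen_getD, PySem.Dict.getD_empty, List.nil_append]

-- the inner distribution loop: getD
theorem pvDist_getD (prev : List String) (x c : String) (hn : prev.Nodup) :
    ∀ (res : PySem.Dict String (List String)),
      (prev.foldl (fun res q => res.modify q [] (fun l => l ++ [x])) res).getD c []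
        = res.getD c [] ++ (if c ∈ prev then [x] else []) := by
  induction prev with
  | nil => intro res; simp
  | cons q t ih =>
    simp only [List.nodup_cons] at hn
    intro res
    simp only [List.foldl_cons]
    rw [ih hn.2, PySem.Dict.getD_modify]
    by_cases hcq : c = q
    · subst hcq
      simp [hn.1]
    · simp [hcq, List.mem_cons]

-- the inner distribution loop: keys
theorem pvDist_keys (prev : List String) (x : String) :
    ∀ (res : PySem.Dict String (List String)), (∀ q ∈ prev, q ∈ res.keys) →
      (prev.foldl (fun res q => res.modify q [] (fun l => l ++ [x])) res).keys = res.keys := by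
  induction prev with
  | nil => intro res _; rfl
  | cons q t ih =>
    intro res hq
    simp only [List.foldl_cons]
    have hkeys : ((res.modify q [] (fun l => l ++ [x]))).keys = res.keys := by
      rw [PySem.Dict.keys_modify, PySem.Dict.keys_insert_of_contains]
      exact (PySem.Dict.contains_iff_mem_keys _ _).2 (hq q (List.mem_cons_self ..))
    rw [ih _ (fun q' hq' => by rw [hkeys]; exact hq q' (List.mem_cons_of_mem _ hq')), hkeys]

-- main invariant of B's single pass, by induction on the processed prefix (from the right)
theorem pvB_inv (rm : List (String × String)) :
    (rm.map (fun p => p.1)).Nodup →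
      ((rm.foldl pvStep (PySem.Dict.empty, PySem.Dict.empty)).1.keys
          = rm.map (fun p => p.1)
        ∧ ∀ c r, (c, r) ∈ rm →
            (rm.foldl pvStep (PySem.Dict.empty, PySem.Dict.empty)).1.getD c []
              = (pvMembers rm r).filter (fun x => x != c)) := by
  induction rm using List.reverseRecOn with
  | nil => intro _; exact ⟨rfl, fun c r h => by cases h⟩
  | append_singleton l p ih =>
    intro hk
    have hk' : (l.map (fun p => p.1)).Nodup ∧ p.1 ∉ l.map (fun p => p.1) := by
      rw [List.map_append] at hk
      simp only [List.map_cons, List.map_nil] at hk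
      constructor
      · exact hk.sublist (List.sublist_append_left _ _)
      · intro hmem
        exact (List.disjoint_of_nodup_append hk) hmem (List.mem_singleton_self _)
    obtain ⟨hkeys, hgetD⟩ := ih hk'.1
    have hprev : ((l.foldl pvStep (PySem.Dict.empty, PySem.Dict.empty)).2).getD p.2 []
        = pvMembers l p.2 := pvSeen l p.2
    have hprev_nodup : (pvMembers l p.2).Nodup := by
      unfold pvMembers
      exact List.Nodup.sublist (List.Sublist.map _ List.filter_sublist) hk'.1
    have hprev_sub : ∀ q ∈ pvMembers l p.2,
        q ∈ (l.foldl pvStep (PySem.Dict.empty, PySem.Dict.empty)).1.keys := by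
      intro q hq
      rw [hkeys]
      exact List.mem_map.2 ⟨(q, p.2), (mem_pvMembers l q p.2).1 hq, rfl⟩
    have hfold : (l ++ [p]).foldl pvStep (PySem.Dict.empty, PySem.Dict.empty)
        = pvStep (l.foldl pvStep (PySem.Dict.empty, PySem.Dict.empty)) p := by
      rw [List.foldl_append]; rfl
    have hc_not_prev : p.1 ∉ pvMembers l p.2 := by
      intro h
      exact hk'.2 (List.mem_map.2 ⟨(p.1, p.2), (mem_pvMembers l p.1 p.2).1 h, rfl⟩)
    have hdk := pvDist_keys (pvMembers l p.2) p.1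
        (l.foldl pvStep (PySem.Dict.empty, PySem.Dict.empty)).1 hprev_sub
    constructor
    · -- keys
      rw [hfold]
      simp only [pvStep, hprev]
      rw [PySem.Dict.keys_insert_of_not_contains _ _
          (by
            rw [Bool.eq_false_iff]
            intro hcon
            have := (PySem.Dict.contains_iff_mem_keys _ _).1 hcon
            rw [hdk, hkeys] at this
            exact hk'.2 this),
        hdk, hkeys, List.map_append]
      simp
    · -- getD
      intro c r hmem
      rw [hfold]
      simp only [pvStep, hprev]
      rw [PySem.Dict.getD_insert]
      have hmem' : (c, r) ∈ l ∨ (c, r) = p := by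
        rcases List.mem_append.1 hmem with h | h
        · exact Or.inl h
        · exact Or.inr (List.mem_singleton.1 h)
      by_cases hcp : c = p.1
      · rw [if_pos hcp]
        have hrp : r = p.2 := by
          rcases hmem' with h | h
          · exfalso
            exact hk'.2 (hcp ▸ List.mem_map.2 ⟨(c, r), h, rfl⟩)
          · rw [← h]
        subst hrp; subst hcp
        rw [pvMembers_append]
        have hsing : pvMembers [p] p.2 = [p.1] := by
          unfold pvMembers; simp
        rw [hsing, List.filter_append]
        have h1 : (pvMembers l p.2).filter (fun x => x != p.1) = pvMembers l p.2 :=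
          List.filter_eq_self.2 (fun b hb => by
            simp only [bne_iff_ne, ne_eq]
            intro hbc; exact hc_not_prev (hbc ▸ hb))
        simp [h1]
      · rw [if_neg hcp]
        have hcl : (c, r) ∈ l := by
          rcases hmem' with h | h
          · exact h
          · exact absurd (congrArg Prod.fst h) hcp
        rw [pvDist_getD _ _ _ hprev_nodup, hgetD c r hcl, pvMembers_append]
        have hsing : pvMembers [p] r = if p.2 == r then [p.1] else [] := by
          unfold pvMembers; by_cases h : (p.2 == r) = true <;> simp [List.filter, h]
        rw [hsing, List.filter_append]
        by_cases hrr : (p.2 == r) = true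
        · have hrr' : r = p.2 := (beq_iff_eq.1 hrr).symm
          have hcprev : c ∈ pvMembers l p.2 :=
            (mem_pvMembers l c p.2).2 (hrr' ▸ hcl)
          have : (p.1 != c) = true := by
            simp only [bne_iff_ne, ne_eq]
            exact fun h => hcp h.symm
          simp [hrr, hcprev, List.filter, this]
        · have hcprev : c ∉ pvMembers l p.2 := by
            intro h
            have := pvKey_unique l hk'.1 hcl ((mem_pvMembers l c p.2).1 h)
            exact hrr (beq_iff_eq.2 this)
          simp [hrr, hcprev]

theorem pvB_eq (rm : List (String × String))
    (hk : (rm.map (fun p => p.1)).Nodup) : build_neighbors_py_alt rm = pvCanon rm := by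
  obtain ⟨hkeys, hgetD⟩ := pvB_inv rm hk
  rw [pvAlt_eq_fold]
  rw [PySem.Dict.items_eq_map_keys _ (hkeys ▸ hk) []]
  rw [hkeys]
  unfold pvCanon
  rw [List.map_map]
  apply List.map_congr_left
  intro p hp
  have hp' : (p.1, p.2) ∈ rm := by simpa using hp
  simp only [Function.comp_apply]
  rw [hgetD p.1 p.2 hp']

-- ===== VERDICT (by name: the statement is the Claim_ definition above) =====
theorem build_neighbors_py_spec : Claim_equal_build_neighbors_py := by
  intro rm _ hpre
  unfold Spec_build_neighbors_py
  rw [pvA_eq rm hpre, pvB_eq rm hpre]
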